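-- pv_equiv track=rewrite | github.com/nadiein/programming-lessons | 23.02.2023/py/main.py | traverse_TCP_states
-- ===== SOURCE A (Python) =====
-- def traverse_TCP_states(events):
--     state = 'CLOSED'
--
--     for event in events:
--         if state == 'CLOSED':
--             if event == 'APP_PASSIVE_OPEN':
--                 state = 'LISTEN'
--             elif event == 'APP_ACTIVE_OPEN':
--                 state = 'SYN_SENT'
--             else:
--                 return 'ERROR'
--         elif state == 'LISTEN':
--             if event == 'RCV_SYN':
--                 state = 'SYN_RCVD'
--             elif event == 'APP_SEND':
--                 state = 'SYN_SENT'
--             elif event == 'APP_CLOSE':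
--                 state = 'CLOSED'
--             else:
--                 return 'ERROR'
--         elif state == 'SYN_RCVD':
--             if event == 'APP_CLOSE':
--                 state = 'FIN_WAIT_1'
--             elif event == 'RCV_ACK':
--                 state = 'ESTABLISHED'
--             else:
--                 return 'ERROR'
--         elif state == 'SYN_SENT':
--             if event == 'RCV_SYN':
--                 state = 'SYN_RCVD'
--             elif event == 'RCV_SYN_ACK':
--                 state = 'ESTABLISHED'
--             elif event == 'APP_CLOSE':
--                 state = 'CLOSED'
--             else:
--                 return 'ERROR'
--         elif state == 'ESTABLISHED':
--             if event == 'APP_CLOSE':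
--                 state = 'FIN_WAIT_1'
--             elif event == 'RCV_FIN':
--                 state = 'CLOSE_WAIT'
--             elif event not in ['APP_SEND', 'RCV_ACK', 'RCV_FIN_ACK']:
--                 return 'ERROR'
--         elif state == 'FIN_WAIT_1':
--             if event == 'RCV_FIN':
--                 state = 'CLOSING'
--             elif event == 'RCV_FIN_ACK':
--                 state = 'TIME_WAIT'
--             elif event == 'RCV_ACK':
--                 state = 'FIN_WAIT_2'
--             else:
--                 return 'ERROR'
--         elif state == 'CLOSING':
--             if event == 'RCV_ACK':
--                 state = 'TIME_WAIT'
--             else: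
--                 return 'ERROR'
--         elif state == 'FIN_WAIT_2':
--             if event == 'RCV_FIN':
--                 state = 'TIME_WAIT'
--             elif event == 'RCV_ACK':
--                 state = 'ESTABLISHED'
--             else:
--                 return 'ERROR'
--         elif state == 'TIME_WAIT':
--             if event == 'APP_TIMEOUT':
--                 state = 'CLOSED'
--             else:
--                 return 'ERROR'
--         elif state == 'CLOSE_WAIT':
--             if event == 'APP_CLOSE':
--                 state = 'LAST_ACK'
--             else:
--                 return 'ERROR'
--         elif state == 'LAST_ACK':
--             if event == 'RCV_ACK':
--                 state = 'CLOSED'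
--             else:
--                 return 'ERROR'
--         else:
--             return 'ERROR'
--
--     return state.upper()
-- ===== SOURCE B (Python) =====
-- # B: instead of stepping one current state through the events, build for each
-- # half of the event list the WHOLE transition function (a state -> state map,
-- # with an absorbing ERROR state) and combine halves by function composition --
-- # an associative divide-and-conquer fold over the transition monoid.
--
-- STATES = ['CLOSED', 'LISTEN', 'SYN_RCVD', 'SYN_SENT', 'ESTABLISHED',
--           'FIN_WAIT_1', 'CLOSING', 'FIN_WAIT_2', 'TIME_WAIT',
--           'CLOSE_WAIT', 'LAST_ACK', 'ERROR']
--
-- TRANS = {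
--     ('CLOSED', 'APP_PASSIVE_OPEN'): 'LISTEN',
--     ('CLOSED', 'APP_ACTIVE_OPEN'): 'SYN_SENT',
--     ('LISTEN', 'RCV_SYN'): 'SYN_RCVD',
--     ('LISTEN', 'APP_SEND'): 'SYN_SENT',
--     ('LISTEN', 'APP_CLOSE'): 'CLOSED',
--     ('SYN_RCVD', 'APP_CLOSE'): 'FIN_WAIT_1',
--     ('SYN_RCVD', 'RCV_ACK'): 'ESTABLISHED',
--     ('SYN_SENT', 'RCV_SYN'): 'SYN_RCVD',
--     ('SYN_SENT', 'RCV_SYN_ACK'): 'ESTABLISHED',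
--     ('SYN_SENT', 'APP_CLOSE'): 'CLOSED',
--     ('ESTABLISHED', 'APP_CLOSE'): 'FIN_WAIT_1',
--     ('ESTABLISHED', 'RCV_FIN'): 'CLOSE_WAIT',
--     ('ESTABLISHED', 'APP_SEND'): 'ESTABLISHED',
--     ('ESTABLISHED', 'RCV_ACK'): 'ESTABLISHED',
--     ('ESTABLISHED', 'RCV_FIN_ACK'): 'ESTABLISHED',
--     ('FIN_WAIT_1', 'RCV_FIN'): 'CLOSING',
--     ('FIN_WAIT_1', 'RCV_FIN_ACK'): 'TIME_WAIT',
--     ('FIN_WAIT_1', 'RCV_ACK'): 'FIN_WAIT_2',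
--     ('CLOSING', 'RCV_ACK'): 'TIME_WAIT',
--     ('FIN_WAIT_2', 'RCV_FIN'): 'TIME_WAIT',
--     ('FIN_WAIT_2', 'RCV_ACK'): 'ESTABLISHED',
--     ('TIME_WAIT', 'APP_TIMEOUT'): 'CLOSED',
--     ('CLOSE_WAIT', 'APP_CLOSE'): 'LAST_ACK',
--     ('LAST_ACK', 'RCV_ACK'): 'CLOSED',
-- }
--
--
-- def _step(event):
--     # the whole-state-space effect of one event (ERROR is absorbing)
--     return {s: TRANS.get((s, event), 'ERROR') for s in STATES}
--
--
-- def _compose(f, g):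
--     # "f then g"; every value of f is in STATES, so g[f[s]] never misses
--     return {s: g[f[s]] for s in STATES}
--
--
-- def _machine(events):
--     if not events:
--         return {s: s for s in STATES}
--     if len(events) == 1:
--         return _step(events[0])
--     mid = len(events) // 2
--     return _compose(_machine(events[:mid]), _machine(events[mid:]))
--
--
-- def traverse_TCP_states(events):
--     return _machine(events)['CLOSED'].upper()
-- ===== Notes on version B (the rewrite author's own statement) =====
-- stated objective: alternative
-- what changed: B never tracks a single current state: it maps each event to its whole state->state transition function (with an absorbing ERROR state) and combines the two halves of the event list by function composition in a divide-and-conquer fold, then applies the composed function to CLOSED; A's early 'return ERROR' becomes absorption in the composed map.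
import Mathlib
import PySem

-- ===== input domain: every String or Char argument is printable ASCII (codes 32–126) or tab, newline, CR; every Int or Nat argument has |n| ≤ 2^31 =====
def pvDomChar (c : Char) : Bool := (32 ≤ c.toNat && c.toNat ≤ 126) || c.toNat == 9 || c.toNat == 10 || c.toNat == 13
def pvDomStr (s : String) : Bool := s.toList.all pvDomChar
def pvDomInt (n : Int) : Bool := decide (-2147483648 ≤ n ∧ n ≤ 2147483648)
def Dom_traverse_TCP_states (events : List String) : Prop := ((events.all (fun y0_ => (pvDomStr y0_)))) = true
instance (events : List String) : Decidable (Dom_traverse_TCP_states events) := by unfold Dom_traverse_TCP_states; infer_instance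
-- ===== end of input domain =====

-- B replaces A's sequential single-state walk by a divide-and-conquer fold that composes
-- whole state→state transition maps (ERROR absorbing) over halves of the event list.
-- ===== PORT A =====
-- loop of A as structural recursion over events; each if/elif chain kept in order
def pvGoA : String → List String → String
  | state, [] => PySem.Str.upper state
  | state, event :: rest =>
    if state = "CLOSED" then
      if event = "APP_PASSIVE_OPEN" then pvGoA "LISTEN" rest
      else if event = "APP_ACTIVE_OPEN" then pvGoA "SYN_SENT" rest
      else "ERROR"
    else if state = "LISTEN" then
      if event = "RCV_SYN" then pvGoA "SYN_RCVD" rest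
      else if event = "APP_SEND" then pvGoA "SYN_SENT" rest
      else if event = "APP_CLOSE" then pvGoA "CLOSED" rest
      else "ERROR"
    else if state = "SYN_RCVD" then
      if event = "APP_CLOSE" then pvGoA "FIN_WAIT_1" rest
      else if event = "RCV_ACK" then pvGoA "ESTABLISHED" rest
      else "ERROR"
    else if state = "SYN_SENT" then
      if event = "RCV_SYN" then pvGoA "SYN_RCVD" rest
      else if event = "RCV_SYN_ACK" then pvGoA "ESTABLISHED" rest
      else if event = "APP_CLOSE" then pvGoA "CLOSED" rest
      else "ERROR"
    else if state = "ESTABLISHED" then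
      if event = "APP_CLOSE" then pvGoA "FIN_WAIT_1" rest
      else if event = "RCV_FIN" then pvGoA "CLOSE_WAIT" rest
      else if event ∉ ["APP_SEND", "RCV_ACK", "RCV_FIN_ACK"] then "ERROR"
      else pvGoA state rest
    else if state = "FIN_WAIT_1" then
      if event = "RCV_FIN" then pvGoA "CLOSING" rest
      else if event = "RCV_FIN_ACK" then pvGoA "TIME_WAIT" rest
      else if event = "RCV_ACK" then pvGoA "FIN_WAIT_2" rest
      else "ERROR"
    else if state = "CLOSING" then
      if event = "RCV_ACK" then pvGoA "TIME_WAIT" rest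
      else "ERROR"
    else if state = "FIN_WAIT_2" then
      if event = "RCV_FIN" then pvGoA "TIME_WAIT" rest
      else if event = "RCV_ACK" then pvGoA "ESTABLISHED" rest
      else "ERROR"
    else if state = "TIME_WAIT" then
      if event = "APP_TIMEOUT" then pvGoA "CLOSED" rest
      else "ERROR"
    else if state = "CLOSE_WAIT" then
      if event = "APP_CLOSE" then pvGoA "LAST_ACK" rest
      else "ERROR"
    else if state = "LAST_ACK" then
      if event = "RCV_ACK" then pvGoA "CLOSED" rest
      else "ERROR"
    else "ERROR"

def traverse_TCP_states (events : List String) : String := pvGoA "CLOSED" events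

-- ===== PORT B =====
-- module-level STATES list and flat (state, event) → next-state table of Source B
def pvSTATES : List String :=
  ["CLOSED", "LISTEN", "SYN_RCVD", "SYN_SENT", "ESTABLISHED",
   "FIN_WAIT_1", "CLOSING", "FIN_WAIT_2", "TIME_WAIT",
   "CLOSE_WAIT", "LAST_ACK", "ERROR"]

def pvTRANS : PySem.Dict (String × String) String :=
  PySem.Dict.mk
    [ (("CLOSED", "APP_PASSIVE_OPEN"), "LISTEN")
    , (("CLOSED", "APP_ACTIVE_OPEN"), "SYN_SENT")
    , (("LISTEN", "RCV_SYN"), "SYN_RCVD")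
    , (("LISTEN", "APP_SEND"), "SYN_SENT")
    , (("LISTEN", "APP_CLOSE"), "CLOSED")
    , (("SYN_RCVD", "APP_CLOSE"), "FIN_WAIT_1")
    , (("SYN_RCVD", "RCV_ACK"), "ESTABLISHED")
    , (("SYN_SENT", "RCV_SYN"), "SYN_RCVD")
    , (("SYN_SENT", "RCV_SYN_ACK"), "ESTABLISHED")
    , (("SYN_SENT", "APP_CLOSE"), "CLOSED")
    , (("ESTABLISHED", "APP_CLOSE"), "FIN_WAIT_1")
    , (("ESTABLISHED", "RCV_FIN"), "CLOSE_WAIT")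
    , (("ESTABLISHED", "APP_SEND"), "ESTABLISHED")
    , (("ESTABLISHED", "RCV_ACK"), "ESTABLISHED")
    , (("ESTABLISHED", "RCV_FIN_ACK"), "ESTABLISHED")
    , (("FIN_WAIT_1", "RCV_FIN"), "CLOSING")
    , (("FIN_WAIT_1", "RCV_FIN_ACK"), "TIME_WAIT")
    , (("FIN_WAIT_1", "RCV_ACK"), "FIN_WAIT_2")
    , (("CLOSING", "RCV_ACK"), "TIME_WAIT")
    , (("FIN_WAIT_2", "RCV_FIN"), "TIME_WAIT")
    , (("FIN_WAIT_2", "RCV_ACK"), "ESTABLISHED")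
    , (("TIME_WAIT", "APP_TIMEOUT"), "CLOSED")
    , (("CLOSE_WAIT", "APP_CLOSE"), "LAST_ACK")
    , (("LAST_ACK", "RCV_ACK"), "CLOSED") ]

-- _step(event): dict comprehension over the distinct STATES keys, in order
def pvStep (event : String) : PySem.Dict String String :=
  PySem.Dict.mk (pvSTATES.map fun s => (s, PySem.Dict.getD pvTRANS (s, event) "ERROR"))

-- _compose(f, g): g[f[s]] — the looked-up keys are always present (values of f lie in
-- STATES and g is total on STATES), so getD with any default is exact here
def pvCompose (f g : PySem.Dict String String) : PySem.Dict String String :=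
  PySem.Dict.mk (pvSTATES.map fun s =>
    (s, PySem.Dict.getD g (PySem.Dict.getD f s "ERROR") "ERROR"))

-- _machine(events): divide and conquer over the event list; events[:mid]/events[mid:]
-- with 0 ≤ mid ≤ len are List.take/List.drop (PySem.List.slice_natCast bounds)
def pvMachine : List String → PySem.Dict String String
  | [] => PySem.Dict.mk (pvSTATES.map fun s => (s, s))
  | [e] => pvStep e
  | e1 :: e2 :: rest =>
    let events := e1 :: e2 :: rest
    let mid := events.length / 2
    pvCompose (pvMachine (events.take mid)) (pvMachine (events.drop mid))
termination_by l => l.length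
decreasing_by
  · simp [List.length_take]; omega
  · simp [List.length_drop]; omega

-- _machine(events)['CLOSED']: the key 'CLOSED' is always present, so getD is exact
def traverse_TCP_states_alt (events : List String) : String :=
  PySem.Str.upper (PySem.Dict.getD (pvMachine events) "CLOSED" "ERROR")

-- ===== PRECONDITION & SPEC =====
def Spec_traverse_TCP_states (events : List String) (out : String) : Prop := out = traverse_TCP_states_alt events
instance (events : List String) (out : String) : Decidable (Spec_traverse_TCP_states events out) := by unfold Spec_traverse_TCP_states; infer_instance

-- ===== CLAIM (what is proved, stated in full; the proofs are below) =====
def Claim_equal_traverse_TCP_states : Prop := ∀ (events : List String), Dom_traverse_TCP_states events → Spec_traverse_TCP_states events (traverse_TCP_states events)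

-- ===== LEMMAS AND PROOFS =====
-- the one-event transition function both programs realise
def pvDelta (s e : String) : String := PySem.Dict.getD pvTRANS (s, e) "ERROR"

theorem pvUpperERR : PySem.Str.upper "ERROR" = "ERROR" := by decide

theorem pvDelta_err (e : String) : pvDelta "ERROR" e = "ERROR" := by
  simp [pvDelta, pvTRANS, PySem.Dict.getD, PySem.Dict.get?]

theorem pvRun_err (l : List String) : List.foldl pvDelta "ERROR" l = "ERROR" := by
  induction l with
  | nil => rfl
  | cons e rest ih => simpa [List.foldl, pvDelta_err] using ih

theorem pvDelta_mem (s e : String) : pvDelta s e ∈ pvSTATES := by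
  unfold pvDelta pvTRANS
  simp only [PySem.Dict.getD, PySem.Dict.get?, List.find?]
  repeat' split
  all_goals decide

theorem pvRun_mem (l : List String) (s : String) (hs : s ∈ pvSTATES) :
    List.foldl pvDelta s l ∈ pvSTATES := by
  induction l generalizing s with
  | nil => simpa using hs
  | cons e rest ih => exact ih _ (pvDelta_mem s e)

-- lookup in a table built by a comprehension over STATES returns the generating function
theorem pvGetD_tab (h : String → String) (s : String) (hs : s ∈ pvSTATES) :
    PySem.Dict.getD (PySem.Dict.mk (pvSTATES.map fun t => (t, h t))) s "ERROR" = h s := by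
  fin_cases hs <;> simp [pvSTATES, PySem.Dict.getD, PySem.Dict.get?]

-- the composed map of B computes the sequential run
theorem pvMachine_run : ∀ (n : Nat) (l : List String), l.length ≤ n →
    ∀ s, s ∈ pvSTATES →
      PySem.Dict.getD (pvMachine l) s "ERROR" = List.foldl pvDelta s l := by
  intro n
  induction n with
  | zero =>
    intro l hl s hs
    have : l = [] := List.eq_nil_of_length_eq_zero (Nat.le_zero.mp hl)
    subst this
    simpa [pvMachine] using pvGetD_tab (fun t => t) s hs
  | succ n ih =>
    intro l hl s hs
    match l with
    | [] => simpa [pvMachine] using pvGetD_tab (fun t => t) s hs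
    | [e] =>
      simpa [pvMachine, pvStep, List.foldl] using pvGetD_tab (fun t => pvDelta t e) s hs
    | e1 :: e2 :: rest =>
      rw [pvMachine]
      simp only [pvCompose]
      set l := e1 :: e2 :: rest with hldef
      set mid := l.length / 2 with hmid
      have hmid1 : 1 ≤ mid := by simp [hmid, hldef, List.length]; omega
      have hmidlt : mid < l.length := by simp [hmid]; omega
      have htake : (l.take mid).length ≤ n := by
        simp [List.length_take]; omega
      have hdrop : (l.drop mid).length ≤ n := by
        simp [List.length_drop]; omega
      rw [pvGetD_tab (fun t =>
        PySem.Dict.getD (pvMachine (l.drop mid))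
          (PySem.Dict.getD (pvMachine (l.take mid)) t "ERROR") "ERROR") s hs]
      rw [ih (l.take mid) htake s hs]
      rw [ih (l.drop mid) hdrop _ (pvRun_mem _ _ hs)]
      rw [← List.foldl_append, List.take_append_drop]

-- A's branch chain computes the same sequential run, then upper-cases the result
theorem pvGoA_run (events : List String) :
    ∀ state : String, pvGoA state events = PySem.Str.upper (List.foldl pvDelta state events) := by
  induction events with
  | nil => intro state; rfl
  | cons event rest ih =>
    intro state
    by_cases h0 : state = "CLOSED"
    · subst h0
      by_cases e0 : event = "APP_PASSIVE_OPEN"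
      · subst e0
        simpa [pvGoA, List.foldl, show pvDelta "CLOSED" "APP_PASSIVE_OPEN" = "LISTEN" from by decide] using ih "LISTEN"
      · by_cases e1 : event = "APP_ACTIVE_OPEN"
        · subst e1
          simpa [pvGoA, List.foldl, show pvDelta "CLOSED" "APP_ACTIVE_OPEN" = "SYN_SENT" from by decide] using ih "SYN_SENT"
        · have hd : pvDelta "CLOSED" event = "ERROR" := by
            simp [pvDelta, pvTRANS, PySem.Dict.getD, PySem.Dict.get?, Ne.symm e0, Ne.symm e1]
          simp [pvGoA, List.foldl, e0, e1, hd, pvRun_err, pvUpperERR]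
    · by_cases h1 : state = "LISTEN"
      · subst h1
        by_cases e0 : event = "RCV_SYN"
        · subst e0
          simpa [pvGoA, List.foldl, show pvDelta "LISTEN" "RCV_SYN" = "SYN_RCVD" from by decide] using ih "SYN_RCVD"
        · by_cases e1 : event = "APP_SEND"
          · subst e1
            simpa [pvGoA, List.foldl, show pvDelta "LISTEN" "APP_SEND" = "SYN_SENT" from by decide] using ih "SYN_SENT"
          · by_cases e2 : event = "APP_CLOSE"
            · subst e2
              simpa [pvGoA, List.foldl, show pvDelta "LISTEN" "APP_CLOSE" = "CLOSED" from by decide] using ih "CLOSED"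
            · have hd : pvDelta "LISTEN" event = "ERROR" := by
                simp [pvDelta, pvTRANS, PySem.Dict.getD, PySem.Dict.get?, Ne.symm e0, Ne.symm e1, Ne.symm e2]
              simp [pvGoA, List.foldl, e0, e1, e2, hd, pvRun_err, pvUpperERR]
      · by_cases h2 : state = "SYN_RCVD"
        · subst h2
          by_cases e0 : event = "APP_CLOSE"
          · subst e0
            simpa [pvGoA, List.foldl, show pvDelta "SYN_RCVD" "APP_CLOSE" = "FIN_WAIT_1" from by decide] using ih "FIN_WAIT_1"
          · by_cases e1 : event = "RCV_ACK"
            · subst e1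
              simpa [pvGoA, List.foldl, show pvDelta "SYN_RCVD" "RCV_ACK" = "ESTABLISHED" from by decide] using ih "ESTABLISHED"
            · have hd : pvDelta "SYN_RCVD" event = "ERROR" := by
                simp [pvDelta, pvTRANS, PySem.Dict.getD, PySem.Dict.get?, Ne.symm e0, Ne.symm e1]
              simp [pvGoA, List.foldl, e0, e1, hd, pvRun_err, pvUpperERR]
        · by_cases h3 : state = "SYN_SENT"
          · subst h3
            by_cases e0 : event = "RCV_SYN"
            · subst e0
              simpa [pvGoA, List.foldl, show pvDelta "SYN_SENT" "RCV_SYN" = "SYN_RCVD" from by decide] using ih "SYN_RCVD"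
            · by_cases e1 : event = "RCV_SYN_ACK"
              · subst e1
                simpa [pvGoA, List.foldl, show pvDelta "SYN_SENT" "RCV_SYN_ACK" = "ESTABLISHED" from by decide] using ih "ESTABLISHED"
              · by_cases e2 : event = "APP_CLOSE"
                · subst e2
                  simpa [pvGoA, List.foldl, show pvDelta "SYN_SENT" "APP_CLOSE" = "CLOSED" from by decide] using ih "CLOSED"
                · have hd : pvDelta "SYN_SENT" event = "ERROR" := by
                    simp [pvDelta, pvTRANS, PySem.Dict.getD, PySem.Dict.get?, Ne.symm e0, Ne.symm e1, Ne.symm e2]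
                  simp [pvGoA, List.foldl, e0, e1, e2, hd, pvRun_err, pvUpperERR]
          · by_cases h4 : state = "ESTABLISHED"
            · subst h4
              by_cases e0 : event = "APP_CLOSE"
              · subst e0
                simpa [pvGoA, List.foldl, show pvDelta "ESTABLISHED" "APP_CLOSE" = "FIN_WAIT_1" from by decide] using ih "FIN_WAIT_1"
              · by_cases e1 : event = "RCV_FIN"
                · subst e1
                  simpa [pvGoA, List.foldl, show pvDelta "ESTABLISHED" "RCV_FIN" = "CLOSE_WAIT" from by decide] using ih "CLOSE_WAIT"
                · by_cases e2 : event = "APP_SEND"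
                  · subst e2
                    simpa [pvGoA, List.foldl, show pvDelta "ESTABLISHED" "APP_SEND" = "ESTABLISHED" from by decide] using ih "ESTABLISHED"
                  · by_cases e3 : event = "RCV_ACK"
                    · subst e3
                      simpa [pvGoA, List.foldl, show pvDelta "ESTABLISHED" "RCV_ACK" = "ESTABLISHED" from by decide] using ih "ESTABLISHED"
                    · by_cases e4 : event = "RCV_FIN_ACK"
                      · subst e4
                        simpa [pvGoA, List.foldl, show pvDelta "ESTABLISHED" "RCV_FIN_ACK" = "ESTABLISHED" from by decide] using ih "ESTABLISHED"
                      · have hd : pvDelta "ESTABLISHED" event = "ERROR" := by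
                          simp [pvDelta, pvTRANS, PySem.Dict.getD, PySem.Dict.get?, Ne.symm e0, Ne.symm e1, Ne.symm e2, Ne.symm e3, Ne.symm e4]
                        simp [pvGoA, List.foldl, e0, e1, e2, e3, e4, hd, pvRun_err, pvUpperERR]
            · by_cases h5 : state = "FIN_WAIT_1"
              · subst h5
                by_cases e0 : event = "RCV_FIN"
                · subst e0
                  simpa [pvGoA, List.foldl, show pvDelta "FIN_WAIT_1" "RCV_FIN" = "CLOSING" from by decide] using ih "CLOSING"
                · by_cases e1 : event = "RCV_FIN_ACK"
                  · subst e1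
                    simpa [pvGoA, List.foldl, show pvDelta "FIN_WAIT_1" "RCV_FIN_ACK" = "TIME_WAIT" from by decide] using ih "TIME_WAIT"
                  · by_cases e2 : event = "RCV_ACK"
                    · subst e2
                      simpa [pvGoA, List.foldl, show pvDelta "FIN_WAIT_1" "RCV_ACK" = "FIN_WAIT_2" from by decide] using ih "FIN_WAIT_2"
                    · have hd : pvDelta "FIN_WAIT_1" event = "ERROR" := by
                        simp [pvDelta, pvTRANS, PySem.Dict.getD, PySem.Dict.get?, Ne.symm e0, Ne.symm e1, Ne.symm e2]
                      simp [pvGoA, List.foldl, e0, e1, e2, hd, pvRun_err, pvUpperERR]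
              · by_cases h6 : state = "CLOSING"
                · subst h6
                  by_cases e0 : event = "RCV_ACK"
                  · subst e0
                    simpa [pvGoA, List.foldl, show pvDelta "CLOSING" "RCV_ACK" = "TIME_WAIT" from by decide] using ih "TIME_WAIT"
                  · have hd : pvDelta "CLOSING" event = "ERROR" := by
                      simp [pvDelta, pvTRANS, PySem.Dict.getD, PySem.Dict.get?, Ne.symm e0]
                    simp [pvGoA, List.foldl, e0, hd, pvRun_err, pvUpperERR]
                · by_cases h7 : state = "FIN_WAIT_2"
                  · subst h7
                    by_cases e0 : event = "RCV_FIN"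
                    · subst e0
                      simpa [pvGoA, List.foldl, show pvDelta "FIN_WAIT_2" "RCV_FIN" = "TIME_WAIT" from by decide] using ih "TIME_WAIT"
                    · by_cases e1 : event = "RCV_ACK"
                      · subst e1
                        simpa [pvGoA, List.foldl, show pvDelta "FIN_WAIT_2" "RCV_ACK" = "ESTABLISHED" from by decide] using ih "ESTABLISHED"
                      · have hd : pvDelta "FIN_WAIT_2" event = "ERROR" := by
                          simp [pvDelta, pvTRANS, PySem.Dict.getD, PySem.Dict.get?, Ne.symm e0, Ne.symm e1]
                        simp [pvGoA, List.foldl, e0, e1, hd, pvRun_err, pvUpperERR]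
                  · by_cases h8 : state = "TIME_WAIT"
                    · subst h8
                      by_cases e0 : event = "APP_TIMEOUT"
                      · subst e0
                        simpa [pvGoA, List.foldl, show pvDelta "TIME_WAIT" "APP_TIMEOUT" = "CLOSED" from by decide] using ih "CLOSED"
                      · have hd : pvDelta "TIME_WAIT" event = "ERROR" := by
                          simp [pvDelta, pvTRANS, PySem.Dict.getD, PySem.Dict.get?, Ne.symm e0]
                        simp [pvGoA, List.foldl, e0, hd, pvRun_err, pvUpperERR]
                    · by_cases h9 : state = "CLOSE_WAIT"
                      · subst h9
                        by_cases e0 : event = "APP_CLOSE"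
                        · subst e0
                          simpa [pvGoA, List.foldl, show pvDelta "CLOSE_WAIT" "APP_CLOSE" = "LAST_ACK" from by decide] using ih "LAST_ACK"
                        · have hd : pvDelta "CLOSE_WAIT" event = "ERROR" := by
                            simp [pvDelta, pvTRANS, PySem.Dict.getD, PySem.Dict.get?, Ne.symm e0]
                          simp [pvGoA, List.foldl, e0, hd, pvRun_err, pvUpperERR]
                      · by_cases h10 : state = "LAST_ACK"
                        · subst h10
                          by_cases e0 : event = "RCV_ACK"
                          · subst e0
                            simpa [pvGoA, List.foldl, show pvDelta "LAST_ACK" "RCV_ACK" = "CLOSED" from by decide] using ih "CLOSED"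
                          · have hd : pvDelta "LAST_ACK" event = "ERROR" := by
                              simp [pvDelta, pvTRANS, PySem.Dict.getD, PySem.Dict.get?, Ne.symm e0]
                            simp [pvGoA, List.foldl, e0, hd, pvRun_err, pvUpperERR]
                        · have hd : pvDelta state event = "ERROR" := by
                            simp [pvDelta, pvTRANS, PySem.Dict.getD, PySem.Dict.get?, Ne.symm h0, Ne.symm h1, Ne.symm h2, Ne.symm h3, Ne.symm h4, Ne.symm h5, Ne.symm h6, Ne.symm h7, Ne.symm h8, Ne.symm h9, Ne.symm h10]
                          simp [pvGoA, List.foldl, h0, h1, h2, h3, h4, h5, h6, h7, h8, h9, h10, hd, pvRun_err, pvUpperERR]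

-- ===== VERDICT (by name: the statement is the Claim_ definition above) =====
theorem traverse_TCP_states_spec : Claim_equal_traverse_TCP_states := by
  intro events _
  unfold Spec_traverse_TCP_states traverse_TCP_states traverse_TCP_states_alt
  rw [pvGoA_run events "CLOSED",
    pvMachine_run events.length events le_rfl "CLOSED" (by decide)]
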